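-- pv_equiv track=rewrite | github.com/userKDH/Enhanced-BM-by-Probabilistic-Superposition-State | max_cut_code/Nonstationary_PSS_max_cut_solver_with_VELR.py | generate_VELR_combinations
-- ===== SOURCE A (Python) =====
-- def generate_VELR_combinations(input_list):
--     # Extract the first and last parts of the node list
--     first_two = input_list[:2]
--     last_two = input_list[2:]
--
--     # Generate all possible combinations of the first part (different from the input)
--     possible_first = []
--     for a in [-1, 1]:
--         for b in [-1, 1]:
--             if [a, b] != first_two:
--                 possible_first.append([a, b])
--
--     # Generate all possible combinations of the last part (different from the input)
--     possible_last = []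
--     for c in [-1, 1]:
--         for d in [-1, 1]:
--             if [c, d] != last_two:
--                 possible_last.append([c, d])
--
--     # Combine the first and last parts
--     result = []
--     for pf in possible_first:
--         for pl in possible_last:
--             result.append(pf + pl)
--
--     return result
-- ===== SOURCE B (Python) =====
-- def generate_VELR_combinations(input_list):
--     # Single flat pass over all 16 sign quadruples, decoded from a 4-bit index;
--     # keep those whose halves both differ from the corresponding halves of the input.
--     first_two = input_list[:2]
--     last_two = input_list[2:]
--     result = []
--     for i in range(16):
--         a = 2 * (i // 8 % 2) - 1
--         b = 2 * (i // 4 % 2) - 1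
--         c = 2 * (i // 2 % 2) - 1
--         d = 2 * (i % 2) - 1
--         if [a, b] != first_two and [c, d] != last_two:
--             result.append([a, b, c, d])
--     return result
-- ===== Notes on version B (the rewrite author's own statement) =====
-- stated objective: simpler
-- what changed: A builds two separately filtered half-lists and combines them with a double loop; B makes one flat pass over a 4-bit index 0..15, decoding each sign quadruple arithmetically and keeping it when both halves differ from the input's halves, with no intermediate lists.
import Mathlib
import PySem

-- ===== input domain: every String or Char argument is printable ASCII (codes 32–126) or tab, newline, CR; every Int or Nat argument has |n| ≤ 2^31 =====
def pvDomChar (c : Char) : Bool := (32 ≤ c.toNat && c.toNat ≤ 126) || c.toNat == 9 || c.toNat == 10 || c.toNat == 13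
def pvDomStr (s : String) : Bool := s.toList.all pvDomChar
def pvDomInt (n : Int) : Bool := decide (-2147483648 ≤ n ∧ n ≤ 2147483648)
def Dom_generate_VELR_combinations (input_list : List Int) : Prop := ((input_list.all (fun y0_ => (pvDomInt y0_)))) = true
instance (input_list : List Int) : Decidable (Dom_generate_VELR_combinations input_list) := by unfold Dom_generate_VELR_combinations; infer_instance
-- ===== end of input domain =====

-- B replaces A's two filtered half-lists and their combining double loop by one flat
-- pass over a 4-bit index decoding each sign quadruple directly (objective: simpler).

-- ===== PORT A =====
def generate_VELR_combinations (input_list : List Int) : List (List Int) :=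
  let first_two := PySem.List.slice input_list none (some 2)
  let last_two := PySem.List.slice input_list (some 2) none
  let possible_first := [(-1 : Int), 1].foldl (fun acc a =>
    [(-1 : Int), 1].foldl (fun acc b =>
      if [a, b] ≠ first_two then acc ++ [[a, b]] else acc) acc) []
  let possible_last := [(-1 : Int), 1].foldl (fun acc c =>
    [(-1 : Int), 1].foldl (fun acc d =>
      if [c, d] ≠ last_two then acc ++ [[c, d]] else acc) acc) []
  possible_first.foldl (fun res pf =>
    possible_last.foldl (fun res pl => res ++ [pf ++ pl]) res) []

-- ===== PORT B =====
def generate_VELR_combinations_alt (input_list : List Int) : List (List Int) :=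
  let first_two := PySem.List.slice input_list none (some 2)
  let last_two := PySem.List.slice input_list (some 2) none
  (PySem.List.pyRange 0 16 1).foldl (fun result i =>
    let a := 2 * PySem.Int.mod (PySem.Int.floordiv i 8) 2 - 1
    let b := 2 * PySem.Int.mod (PySem.Int.floordiv i 4) 2 - 1
    let c := 2 * PySem.Int.mod (PySem.Int.floordiv i 2) 2 - 1
    let d := 2 * PySem.Int.mod i 2 - 1
    -- Python's short-circuit 'and' ported as nested ifs
    if [a, b] ≠ first_two then
      if [c, d] ≠ last_two then result ++ [[a, b, c, d]] else result
    else result) []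

-- ===== PRECONDITION & SPEC =====
def Spec_generate_VELR_combinations (input_list : List Int) (out : List (List Int)) : Prop := out = generate_VELR_combinations_alt input_list
instance (input_list : List Int) (out : List (List Int)) : Decidable (Spec_generate_VELR_combinations input_list out) := by unfold Spec_generate_VELR_combinations; infer_instance

-- ===== CLAIM (what is proved, stated in full; the proofs are below) =====
def Claim_equal_generate_VELR_combinations : Prop := ∀ (input_list : List Int), Dom_generate_VELR_combinations input_list → Spec_generate_VELR_combinations input_list (generate_VELR_combinations input_list)

-- ===== LEMMAS AND PROOFS =====

-- inner combining loop of A: appending one concatenation per element is init ++ map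
theorem pv_inner_comb (pf : List Int) (pls : List (List Int)) (res : List (List Int)) :
    List.foldl (fun res pl => res ++ [pf ++ pl]) res pls = res ++ pls.map (fun pl => pf ++ pl) := by
  induction pls generalizing res with
  | nil => simp
  | cons x xs ih => simp [List.foldl_cons, ih]

-- outer combining loop of A is a flatMap
theorem pv_outer_comb (pls pfs : List (List Int)) (acc : List (List Int)) :
    List.foldl (fun res pf => List.foldl (fun res pl => res ++ [pf ++ pl]) res pls) acc pfs
      = acc ++ pfs.flatMap (fun pf => pls.map (fun pl => pf ++ pl)) := by
  induction pfs generalizing acc with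
  | nil => simp
  | cons x xs ih =>
    rw [List.foldl_cons, pv_inner_comb, ih]
    simp [List.flatMap_cons]

-- B's guarded accumulating loop is a filter-then-map
theorem pv_bfold (P Q : Int → Prop) [DecidablePred P] [DecidablePred Q] (g : Int → List Int)
    (xs : List Int) (acc : List (List Int)) :
    List.foldl (fun res i => if P i then (if Q i then res ++ [g i] else res) else res) acc xs
      = acc ++ (xs.filter (fun i => decide (P i) && decide (Q i))).map g := by
  induction xs generalizing acc with
  | nil => simp
  | cons x xs ih =>
    by_cases hp : P x <;> by_cases hq : Q x <;>
      simp [List.foldl_cons, hp, hq, ih]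

-- A's filtering loop over the four sign pairs is a filter
theorem pv_afold (R : List Int → Prop) [DecidablePred R] :
    List.foldl (fun acc a =>
      List.foldl (fun acc b =>
        if R [a, b] then acc ++ [[a, b]] else acc) acc [(-1 : Int), 1]) []
        [(-1 : Int), 1]
      = ([[(-1 : Int), -1], [-1, 1], [1, -1], [1, 1]] : List (List Int)).filter
          (fun q => decide (R q)) := by
  by_cases h1 : R [-1, -1] <;> by_cases h2 : R [-1, 1] <;>
  by_cases h3 : R [1, -1] <;> by_cases h4 : R [1, 1] <;>
    simp [List.foldl_cons, h1, h2, h3, h4]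

set_option maxHeartbeats 4000000 in
-- Core equality, with the two slices generalized to arbitrary lists ft, lt.
theorem pv_core (ft lt : List Int) :
    ([(-1 : Int), 1].foldl (fun acc a =>
        [(-1 : Int), 1].foldl (fun acc b =>
          if [a, b] ≠ ft then acc ++ [[a, b]] else acc) acc) []).foldl (fun res pf =>
      ([(-1 : Int), 1].foldl (fun acc c =>
        [(-1 : Int), 1].foldl (fun acc d =>
          if [c, d] ≠ lt then acc ++ [[c, d]] else acc) acc) []).foldl
        (fun res pl => res ++ [pf ++ pl]) res) []
    = (PySem.List.pyRange 0 16 1).foldl (fun result i =>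
        let a := 2 * PySem.Int.mod (PySem.Int.floordiv i 8) 2 - 1
        let b := 2 * PySem.Int.mod (PySem.Int.floordiv i 4) 2 - 1
        let c := 2 * PySem.Int.mod (PySem.Int.floordiv i 2) 2 - 1
        let d := 2 * PySem.Int.mod i 2 - 1
        if [a, b] ≠ ft then
          if [c, d] ≠ lt then result ++ [[a, b, c, d]] else result
        else result) [] := by
  have hr : PySem.List.pyRange 0 16 1 = [0,1,2,3,4,5,6,7,8,9,10,11,12,13,14,15] := by rfl
  rw [hr, pv_afold (fun q => q ≠ ft), pv_afold (fun q => q ≠ lt), pv_outer_comb,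
    pv_bfold (fun i => [2 * PySem.Int.mod (PySem.Int.floordiv i 8) 2 - 1,
                        2 * PySem.Int.mod (PySem.Int.floordiv i 4) 2 - 1] ≠ ft)
             (fun i => [2 * PySem.Int.mod (PySem.Int.floordiv i 2) 2 - 1,
                        2 * PySem.Int.mod i 2 - 1] ≠ lt)]
  by_cases h1 : ([(-1 : Int), -1] : List Int) = ft <;>
  by_cases h2 : ([(-1 : Int), 1] : List Int) = ft <;>
  by_cases h3 : ([(1 : Int), -1] : List Int) = ft <;>
  by_cases h4 : ([(1 : Int), 1] : List Int) = ft <;>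
  by_cases h5 : ([(-1 : Int), -1] : List Int) = lt <;>
  by_cases h6 : ([(-1 : Int), 1] : List Int) = lt <;>
  by_cases h7 : ([(1 : Int), -1] : List Int) = lt <;>
  by_cases h8 : ([(1 : Int), 1] : List Int) = lt <;>
    subst_vars <;>
    simp_all [PySem.Int.floordiv, PySem.Int.mod]

-- ===== VERDICT (by name: the statement is the Claim_ definition above) =====
theorem generate_VELR_combinations_spec : Claim_equal_generate_VELR_combinations := by
  intro input_list _
  unfold Spec_generate_VELR_combinations generate_VELR_combinations generate_VELR_combinations_alt
  exact pv_core _ _
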